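-- pv_equiv track=rewrite | github.com/tomaskrupka/Lux-ai-2021 | bot_orchestrated/develop_cluster.py | solve_churn
-- ===== SOURCE A (Python) =====
-- def solve_churn(positions_options):
--     move_solutions = dict()
--     churn = dict()
--     for position, options in positions_options:
--         for option in options:
--             churn[option] = churn[option] + 1 if option in churn else 1
--     # units with least options first
--     positions_options.sort(key=lambda x: (len(x[1])))
--     move_demands = list(churn.items())
--     # least demanded positions first
--     move_demands.sort(key=lambda x: (x[1]))
--     blocked_moves = set()
--     for position_options in positions_options:
--         unit_pos = position_options[0]
--         unit_options = position_options[1]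
--         unit_moved = False
--         for demand_option in move_demands:
--             move_pos = demand_option[0]
--             if move_pos in unit_options and move_pos not in blocked_moves:
--                 blocked_moves.add(move_pos)
--                 if unit_pos in move_solutions:
--                     move_solutions[unit_pos].append(move_pos)
--                 else:
--                     move_solutions[unit_pos] = [move_pos]
--                 unit_moved = True
--                 break
--         if not unit_moved:
--             if unit_pos in move_solutions:
--                 move_solutions[unit_pos].append(None)
--             else:
--                 move_solutions[unit_pos] = [None]
--     return move_solutions
-- ===== SOURCE B (Python) =====
-- def solve_churn(positions_options):
--     # Demand count for every move option (dict preserves first-occurrence order).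
--     churn = {}
--     for _, options in positions_options:
--         for option in options:
--             churn[option] = churn.get(option, 0) + 1
--     # units with least options first (same in-place sort as the original)
--     positions_options.sort(key=lambda x: len(x[1]))
--     # rank[option] = position of the option in the least-demanded-first order
--     rank = {option: i for i, (option, _) in enumerate(sorted(churn.items(), key=lambda x: x[1]))}
--     move_solutions = {}
--     blocked_moves = set()
--     for unit_pos, unit_options in positions_options:
--         best = None
--         for option in unit_options:
--             if option not in blocked_moves and (best is None or rank[option] < rank[best]):
--                 best = option
--         if best is not None:
--             blocked_moves.add(best)
--         move_solutions.setdefault(unit_pos, []).append(best)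
--     return move_solutions
-- ===== Notes on version B (the rewrite author's own statement) =====
-- stated objective: faster
-- what changed: Instead of scanning the whole demand-sorted move list for every unit, B precomputes a demand-rank dictionary once and picks each unit's move by a single min-by-rank pass over that unit's own options.
import Mathlib
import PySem

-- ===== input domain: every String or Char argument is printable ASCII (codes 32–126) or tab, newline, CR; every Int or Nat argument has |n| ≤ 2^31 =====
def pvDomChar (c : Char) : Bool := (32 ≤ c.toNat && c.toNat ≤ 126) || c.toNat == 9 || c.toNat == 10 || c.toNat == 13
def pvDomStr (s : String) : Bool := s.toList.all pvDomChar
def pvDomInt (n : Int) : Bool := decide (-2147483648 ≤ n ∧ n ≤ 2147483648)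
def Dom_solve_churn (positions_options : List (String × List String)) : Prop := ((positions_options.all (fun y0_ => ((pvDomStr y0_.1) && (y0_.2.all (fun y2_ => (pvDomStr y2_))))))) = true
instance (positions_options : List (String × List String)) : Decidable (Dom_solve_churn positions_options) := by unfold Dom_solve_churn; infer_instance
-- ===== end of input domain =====

-- B replaces A's per-unit scan of the whole demand-sorted move list by a precomputed
-- demand-rank dictionary and a single min-by-rank pass over the unit's own options
-- (asymptotically faster); both versions sort the argument list in place in Python —
-- the equivalence proved here is about the return value.

-- ===== PORT A =====
def pvChurnA (positions_options : List (String × List String)) : PySem.Dict String Int :=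
  positions_options.foldl
    (fun churn p => p.2.foldl
      (fun churn option =>
        churn.insert option (if churn.contains option then churn.getD option 0 + 1 else 1))
      churn)
    PySem.Dict.empty

-- the inner 'for demand_option in move_demands: … break' loop of A
def pvFirstMove (move_demands : List (String × Int)) (unit_options : List String)
    (blocked : PySem.Set String) : Option String :=
  match move_demands with
  | [] => none
  | d :: rest =>
      if unit_options.contains d.1 && !(PySem.Set.contains blocked d.1) then some d.1
      else pvFirstMove rest unit_options blocked

def pvStepA (move_demands : List (String × Int))
    (st : PySem.Dict String (List (Option String)) × PySem.Set String)
    (p : String × List String) :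
    PySem.Dict String (List (Option String)) × PySem.Set String :=
  match pvFirstMove move_demands p.2 st.2 with
  | some move_pos =>
      (if st.1.contains p.1 then st.1.insert p.1 (st.1.getD p.1 [] ++ [some move_pos])
       else st.1.insert p.1 [some move_pos],
       PySem.Set.add st.2 move_pos)
  | none =>
      (if st.1.contains p.1 then st.1.insert p.1 (st.1.getD p.1 [] ++ [none])
       else st.1.insert p.1 [none],
       st.2)

def solve_churn (positions_options : List (String × List String)) :
    List (String × List (Option String)) :=
  let churn := pvChurnA positions_options
  let sorted_pos := PySem.List.sorted positions_options (fun x => (x.2.length : Int)) false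
  let move_demands := PySem.List.sorted churn.items (fun x => x.2) false
  (sorted_pos.foldl (pvStepA move_demands) (PySem.Dict.empty, PySem.Set.empty)).1.items

-- ===== PORT B =====
def pvChurnB (positions_options : List (String × List String)) : PySem.Dict String Int :=
  positions_options.foldl
    (fun churn p => p.2.foldl
      (fun churn option => churn.insert option (churn.getD option 0 + 1)) churn)
    PySem.Dict.empty

-- {option: i for i, (option, _) in enumerate(sorted(churn.items(), key=lambda x: x[1]))}
def pvRank (move_demands : List (String × Int)) : PySem.Dict String Int :=
  (PySem.List.enumerate move_demands).foldl (fun d q => d.insert q.2.1 q.1) PySem.Dict.empty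

-- Python's rank[option] ported as getD _ 0: every option occurring in the input is a key
-- of rank, so the default is never read (KeyError is unreachable).
def pvBest (rank : PySem.Dict String Int) (blocked : PySem.Set String)
    (unit_options : List String) : Option String :=
  unit_options.foldl
    (fun best option =>
      if !(PySem.Set.contains blocked option) &&
         (match best with
          | none => true
          | some b => decide (rank.getD option 0 < rank.getD b 0)) then some option
      else best)
    none

def pvStepB (rank : PySem.Dict String Int)
    (st : PySem.Dict String (List (Option String)) × PySem.Set String)
    (p : String × List String) :
    PySem.Dict String (List (Option String)) × PySem.Set String :=
  let best := pvBest rank st.2 p.2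
  (st.1.modify p.1 [] (· ++ [best]),      -- setdefault(unit_pos, []).append(best)
   match best with
   | some b => PySem.Set.add st.2 b
   | none => st.2)

def solve_churn_alt (positions_options : List (String × List String)) :
    List (String × List (Option String)) :=
  let churn := pvChurnB positions_options
  let sorted_pos := PySem.List.sorted positions_options (fun x => (x.2.length : Int)) false
  let rank := pvRank (PySem.List.sorted churn.items (fun x => x.2) false)
  (sorted_pos.foldl (pvStepB rank) (PySem.Dict.empty, PySem.Set.empty)).1.items

-- ===== PRECONDITION & SPEC =====
def Spec_solve_churn (positions_options : List (String × List String)) (out : List (String × List (Option String))) : Prop := out = solve_churn_alt positions_options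
instance (positions_options : List (String × List String)) (out : List (String × List (Option String))) : Decidable (Spec_solve_churn positions_options out) := by unfold Spec_solve_churn; infer_instance

-- ===== CLAIM (what is proved, stated in full; the proofs are below) =====
def Claim_equal_solve_churn : Prop := ∀ (positions_options : List (String × List String)), Dom_solve_churn positions_options → Spec_solve_churn positions_options (solve_churn positions_options)

-- ===== LEMMAS AND PROOFS =====

-- The two churn-counting loops build the same dict.
lemma pv_churn_eq (po : List (String × List String)) : pvChurnA po = pvChurnB po := by
  unfold pvChurnA pvChurnB
  apply PySem.List.foldl_congr_mem
  intro acc p _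
  apply PySem.List.foldl_congr_mem
  intro c o _
  by_cases h : c.contains o = true
  · simp [h]
  · simp only [Bool.not_eq_true] at h
    simp [h, PySem.Dict.getD_of_not_contains c (0 : Int) h]

-- keys of the churn dict = all options occurring in the input
lemma pv_mem_keys_churn_fold (po : List (String × List String))
    (d : PySem.Dict String Int) (o : String) :
    o ∈ (po.foldl (fun churn p => p.2.foldl
          (fun churn option => churn.insert option (churn.getD option 0 + 1)) churn) d).keys
      ↔ o ∈ d.keys ∨ ∃ p ∈ po, o ∈ p.2 := by
  induction po generalizing d with
  | nil => simp
  | cons p po ih =>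
    simp only [List.foldl_cons, ih, PySem.Dict.keys_foldl_insert, PySem.Set.mem_update,
      List.mem_cons]
    constructor
    · rintro (((h | h) | ⟨q, hq, hoq⟩))
      · exact Or.inl h
      · exact Or.inr ⟨p, Or.inl rfl, h⟩
      · exact Or.inr ⟨q, Or.inr hq, hoq⟩
    · rintro (h | ⟨q, (rfl | hq), hoq⟩)
      · exact Or.inl (Or.inl h)
      · exact Or.inl (Or.inr hoq)
      · exact Or.inr ⟨q, hq, hoq⟩

lemma pv_nodup_keys_churn (po : List (String × List String)) :
    (pvChurnB po).keys.Nodup := by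
  unfold pvChurnB
  generalize h : (PySem.Dict.empty : PySem.Dict String Int) = d
  have hd : d.keys.Nodup := h ▸ PySem.Dict.nodup_keys_empty
  clear h
  induction po generalizing d with
  | nil => exact hd
  | cons p po ih =>
    exact ih _ (PySem.Dict.nodup_keys_foldl_insert _ _ _ hd)

-- the rank dict lists each demand key with its index
lemma pv_items_rank (ds : List (String × Int)) (hnd : (ds.map Prod.fst).Nodup) :
    (pvRank ds).items = (PySem.List.enumerate ds).map (fun q => (q.2.1, q.1)) := by
  unfold pvRank
  have h := PySem.Dict.items_foldl_insert_fresh (PySem.List.enumerate ds)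
      (fun q => q.2.1) (fun q => q.1) PySem.Dict.empty
      (by intro a _; simp [PySem.Dict.contains_empty])
      (by
        have : (PySem.List.enumerate ds).map (fun q => q.2.1)
            = ds.map Prod.fst := by
          have h2 := PySem.List.map_snd_enumerate ds 0
          calc (PySem.List.enumerate ds).map (fun q => q.2.1)
              = ((PySem.List.enumerate ds).map (fun q => q.2)).map Prod.fst := by
                rw [List.map_map]; rfl
            _ = ds.map Prod.fst := by rw [h2]
        rw [this]; exact hnd)
  simpa using h

lemma pv_keys_rank (ds : List (String × Int)) (hnd : (ds.map Prod.fst).Nodup) :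
    (pvRank ds).keys = ds.map Prod.fst := by
  have h := pv_items_rank ds hnd
  have : (pvRank ds).keys = (pvRank ds).items.map Prod.fst := rfl
  rw [this, h, List.map_map]
  have h2 := PySem.List.map_snd_enumerate ds 0
  calc (PySem.List.enumerate ds).map (Prod.fst ∘ fun q => (q.2.1, q.1))
      = ((PySem.List.enumerate ds).map (fun q => q.2)).map Prod.fst := by
        rw [List.map_map]; rfl
    _ = ds.map Prod.fst := by rw [h2]

lemma pv_rank_getD (ds : List (String × Int)) (hnd : (ds.map Prod.fst).Nodup)
    (i : Nat) (hi : i < ds.length) :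
    (pvRank ds).getD (ds[i].1) 0 = (i : Int) := by
  apply PySem.Dict.getD_of_mem_items
  · rw [pv_items_rank ds hnd]
    refine List.mem_map.mpr ⟨((i : Int), ds[i]), ?_, rfl⟩
    rw [PySem.List.mem_enumerate_iff]
    exact ⟨i, hi, by simp⟩
  · rw [pv_keys_rank ds hnd]; exact hnd

-- firstMove: none iff no demand is usable
lemma pv_firstMove_none (ds : List (String × Int)) (opts : List String)
    (blocked : PySem.Set String)
    (h : ∀ d ∈ ds, (opts.contains d.1 && !(PySem.Set.contains blocked d.1)) = false) :
    pvFirstMove ds opts blocked = none := by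
  induction ds with
  | nil => rfl
  | cons d ds ih =>
    rw [pvFirstMove]
    rw [h d (List.mem_cons_self)]
    simp only [Bool.false_eq_true, if_false]
    exact ih (fun d hd => h d (List.mem_cons_of_mem _ hd))

lemma pv_firstMove_isSome (ds : List (String × Int)) (opts : List String)
    (blocked : PySem.Set String)
    (h : ∃ d ∈ ds, (opts.contains d.1 && !(PySem.Set.contains blocked d.1)) = true) :
    (pvFirstMove ds opts blocked).isSome := by
  induction ds with
  | nil => simp at h
  | cons d ds ih =>
    rw [pvFirstMove]
    by_cases hc : (opts.contains d.1 && !(PySem.Set.contains blocked d.1)) = true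
    · rw [if_pos hc]; rfl
    · rw [if_neg hc]
      rcases h with ⟨e, he, hpe⟩
      rcases List.mem_cons.mp he with rfl | he'
      · exact absurd hpe hc
      · exact ih ⟨e, he', hpe⟩

-- firstMove: structure of a successful pick (first usable demand)
lemma pv_firstMove_some (ds : List (String × Int)) (opts : List String)
    (blocked : PySem.Set String) {k : String}
    (h : pvFirstMove ds opts blocked = some k) :
    (opts.contains k && !(PySem.Set.contains blocked k)) = true ∧
    ∃ i, ∃ (hi : i < ds.length), ds[i].1 = k ∧
      ∀ j (hj : j < ds.length), j < i →
        (opts.contains (ds[j].1) && !(PySem.Set.contains blocked (ds[j].1))) = false := by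
  induction ds with
  | nil => simp [pvFirstMove] at h
  | cons d ds ih =>
    rw [pvFirstMove] at h
    by_cases hc : (opts.contains d.1 && !(PySem.Set.contains blocked d.1)) = true
    · rw [if_pos hc] at h
      obtain rfl : d.1 = k := by injection h
      exact ⟨hc, 0, by simp, rfl, by intro j hj hj0; omega⟩
    · rw [if_neg hc] at h
      obtain ⟨hp, i, hi, hk, hmin⟩ := ih h
      refine ⟨hp, i + 1, by simpa using Nat.succ_lt_succ hi, by simpa using hk, ?_⟩
      intro j hj hji
      cases j with
      | zero =>
        simp only [List.getElem_cons_zero]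
        exact Bool.eq_false_iff.mpr hc
      | succ j =>
        simp only [List.getElem_cons_succ]
        exact hmin j (by simpa using Nat.lt_of_succ_lt_succ hj) (by omega)

-- pvBest fold invariant
lemma pv_best_inv (rank : PySem.Dict String Int) (blocked : PySem.Set String)
    (opts : List String) :
    ∀ acc : Option String,
      (opts.foldl
        (fun best option =>
          if !(PySem.Set.contains blocked option) &&
             (match best with
              | none => true
              | some b => decide (rank.getD option 0 < rank.getD b 0)) then some option
          else best) acc = none →
        acc = none ∧ ∀ o ∈ opts, PySem.Set.contains blocked o = true)
      ∧ (∀ b, opts.foldl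
          (fun best option =>
            if !(PySem.Set.contains blocked option) &&
               (match best with
                | none => true
                | some b => decide (rank.getD option 0 < rank.getD b 0)) then some option
            else best) acc = some b →
          ((b ∈ opts ∧ PySem.Set.contains blocked b = false) ∨ acc = some b)
          ∧ (∀ o ∈ opts, PySem.Set.contains blocked o = false →
              rank.getD b 0 ≤ rank.getD o 0)
          ∧ (∀ a, acc = some a → rank.getD b 0 ≤ rank.getD a 0)) := by
  induction opts with
  | nil =>
    intro acc
    refine ⟨fun h => ⟨h, by simp⟩, fun b hb => ⟨Or.inr hb, by simp, ?_⟩⟩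
    intro a ha; rw [ha] at hb; injection hb with hba; rw [hba]
  | cons o opts ih =>
    intro acc
    simp only [List.foldl_cons]
    by_cases hc : (!(PySem.Set.contains blocked o) &&
        (match acc with
         | none => true
         | some b => decide (rank.getD o 0 < rank.getD b 0))) = true
    · rw [if_pos hc]
      obtain ⟨ihn, ihs⟩ := ih (some o)
      constructor
      · intro h; exact absurd (ihn h).1 (by simp)
      · intro b hb
        obtain ⟨hmem, hmin, hacc⟩ := ihs b hb
        have hob : rank.getD b 0 ≤ rank.getD o 0 := hacc o rfl
        have hounbl : PySem.Set.contains blocked o = false := by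
          rcases Bool.and_eq_true_iff.mp hc with ⟨h1, _⟩
          simpa using h1
        refine ⟨?_, ?_, ?_⟩
        · rcases hmem with h | h
          · exact Or.inl ⟨List.mem_cons_of_mem _ h.1, h.2⟩
          · injection h with h; exact Or.inl ⟨by rw [← h]; exact List.mem_cons_self, by rw [← h]; exact hounbl⟩
        · intro o' ho' ho'unbl
          rcases List.mem_cons.mp ho' with rfl | ho'
          · exact hob
          · exact hmin o' ho' ho'unbl
        · intro a ha
          rcases Bool.and_eq_true_iff.mp hc with ⟨_, h2⟩
          rw [ha] at h2
          have : rank.getD o 0 < rank.getD a 0 := by simpa using h2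
          omega
    · rw [if_neg hc]
      obtain ⟨ihn, ihs⟩ := ih acc
      constructor
      · intro h
        obtain ⟨hacc, hall⟩ := ihn h
        refine ⟨hacc, ?_⟩
        intro o' ho'
        rcases List.mem_cons.mp ho' with rfl | ho'
        · subst hacc
          cases hb : PySem.Set.contains blocked o' with
          | true => rfl
          | false => exact absurd (by rw [hb]; rfl) hc
        · exact hall o' ho'
      · intro b hb
        obtain ⟨hmem, hmin, hacc⟩ := ihs b hb
        refine ⟨?_, ?_, hacc⟩
        · rcases hmem with h | h
          · exact Or.inl ⟨List.mem_cons_of_mem _ h.1, h.2⟩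
          · exact Or.inr h
        · intro o' ho' ho'unbl
          rcases List.mem_cons.mp ho' with rfl | ho'
          · -- condition was false but o' is unblocked: acc = some a with rank a ≤ rank o'
            cases hacco : acc with
            | none => rw [hacco] at hc; exact absurd (by rw [ho'unbl]; rfl) hc
            | some a =>
              rw [hacco] at hc
              have hao : rank.getD a 0 ≤ rank.getD o' 0 := by
                by_contra hlt
                exact hc (by simp only [ho'unbl, Bool.not_false, Bool.true_and,
                  decide_eq_true_eq]; omega)
              have := hacc a hacco
              omega
          · exact hmin o' ho' ho'unbl

-- the central fact: A's scan over the demand-sorted list picks the same move as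
-- B's min-by-rank pass over the unit's own options
lemma pv_pick_eq (ds : List (String × Int)) (opts : List String)
    (blocked : PySem.Set String)
    (hnd : (ds.map Prod.fst).Nodup)
    (hsub : ∀ o ∈ opts, o ∈ ds.map Prod.fst) :
    pvFirstMove ds opts blocked = pvBest (pvRank ds) blocked opts := by
  have hinv := pv_best_inv (pvRank ds) blocked opts
  by_cases hex : ∃ d ∈ ds, (opts.contains d.1 && !(PySem.Set.contains blocked d.1)) = true
  · cases hFMeq : pvFirstMove ds opts blocked with
    | none =>
      have hFM := pv_firstMove_isSome ds opts blocked hex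
      rw [hFMeq] at hFM; simp at hFM
    | some k =>
      obtain ⟨hpk, i, hi, hik, hmin⟩ := pv_firstMove_some ds opts blocked hFMeq
      obtain ⟨hk1, hk2⟩ := Bool.and_eq_true_iff.mp hpk
      have hk2f : PySem.Set.contains blocked k = false := by
        cases h : PySem.Set.contains blocked k
        · rfl
        · rw [h] at hk2; simp at hk2
      have hkmem : k ∈ opts := List.mem_of_elem_eq_true hk1
      cases hB : pvBest (pvRank ds) blocked opts with
      | none =>
        unfold pvBest at hB
        obtain ⟨-, hall⟩ := (hinv none).1 hB
        rw [hall k hkmem] at hk2f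
        exact absurd hk2f (by simp)
      | some b =>
        unfold pvBest at hB
        obtain ⟨hmem, hminb, -⟩ := (hinv none).2 b hB
        have hbmem : b ∈ opts ∧ PySem.Set.contains blocked b = false := by
          rcases hmem with h | h
          · exact h
          · exact absurd h (by simp)
        have hbkeys : b ∈ ds.map Prod.fst := hsub b hbmem.1
        obtain ⟨j, hj, hjb⟩ := List.mem_iff_getElem.mp hbkeys
        rw [List.length_map] at hj
        have hjb' : ds[j].1 = b := by
          rw [List.getElem_map] at hjb; exact hjb
        have hrb : (pvRank ds).getD b 0 = (j : Int) := by
          rw [← hjb']; exact pv_rank_getD ds hnd j hj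
        have hrk : (pvRank ds).getD k 0 = (i : Int) := by
          rw [← hik]; exact pv_rank_getD ds hnd i hi
        have hle : (pvRank ds).getD b 0 ≤ (pvRank ds).getD k 0 := hminb k hkmem hk2f
        have hij : i ≤ j := by
          by_contra hlt
          have hji : j < i := by omega
          have := hmin j hj hji
          rw [hjb'] at this
          have hcb : opts.contains b = true := List.elem_eq_true_of_mem hbmem.1
          rw [hcb, hbmem.2] at this
          simp at this
        have : i = j := by rw [hrb, hrk] at hle; omega
        subst this
        rw [← hik, hjb']
  · have hall : ∀ d ∈ ds, (opts.contains d.1 && !(PySem.Set.contains blocked d.1)) = false := by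
      intro d hd
      cases h : (opts.contains d.1 && !(PySem.Set.contains blocked d.1))
      · rfl
      · exact absurd ⟨d, hd, h⟩ hex
    rw [pv_firstMove_none ds opts blocked hall]
    cases hB : pvBest (pvRank ds) blocked opts with
    | none => rfl
    | some b =>
      unfold pvBest at hB
      obtain ⟨hmem, -, -⟩ := (hinv none).2 b hB
      have hbmem : b ∈ opts ∧ PySem.Set.contains blocked b = false := by
        rcases hmem with h | h
        · exact h
        · exact absurd h (by simp)
      obtain ⟨d, hd, hdb⟩ := List.mem_map.mp (hsub b hbmem.1)
      refine absurd ⟨d, hd, ?_⟩ hex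
      have hcb : opts.contains b = true := List.elem_eq_true_of_mem hbmem.1
      rw [hdb, hcb, hbmem.2]
      rfl

-- per-unit step equality
lemma pv_step_eq (ds : List (String × Int))
    (hnd : (ds.map Prod.fst).Nodup)
    (st : PySem.Dict String (List (Option String)) × PySem.Set String)
    (p : String × List String)
    (hsub : ∀ o ∈ p.2, o ∈ ds.map Prod.fst) :
    pvStepA ds st p = pvStepB (pvRank ds) st p := by
  have hpick := pv_pick_eq ds p.2 st.2 hnd hsub
  have happ : ∀ (v : Option String),
      (if st.1.contains p.1 then st.1.insert p.1 (st.1.getD p.1 [] ++ [v])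
       else st.1.insert p.1 [v]) = st.1.modify p.1 [] (· ++ [v]) := by
    intro v
    by_cases h : st.1.contains p.1 = true
    · rw [if_pos h]; rfl
    · rw [if_neg h]
      have h' : st.1.contains p.1 = false := by
        cases hh : st.1.contains p.1
        · rfl
        · exact absurd hh h
      show st.1.insert p.1 [v] = st.1.insert p.1 ((st.1.getD p.1 []) ++ [v])
      rw [PySem.Dict.getD_of_not_contains st.1 _ h']
      rfl
  unfold pvStepA pvStepB
  rw [← hpick]
  cases hFM : pvFirstMove ds p.2 st.2 with
  | none => exact congrArg (fun d => (d, st.2)) (happ none)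
  | some mp => exact congrArg (fun d => (d, PySem.Set.add st.2 mp)) (happ (some mp))

-- ===== VERDICT (by name: the statement is the Claim_ definition above) =====
theorem solve_churn_spec : Claim_equal_solve_churn := by
  intro po _
  unfold Spec_solve_churn
  simp only [solve_churn, solve_churn_alt]
  rw [pv_churn_eq po]
  have hperm : (PySem.List.sorted (pvChurnB po).items (fun x => x.2) false).Perm
      (pvChurnB po).items := PySem.List.sorted_perm _ _ _
  have hpermf := hperm.map Prod.fst
  have hkeys : (pvChurnB po).items.map Prod.fst = (pvChurnB po).keys := rfl
  have hnd : ((PySem.List.sorted (pvChurnB po).items (fun x => x.2) false).map Prod.fst).Nodup := by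
    rw [List.Perm.nodup_iff hpermf, hkeys]
    exact pv_nodup_keys_churn po
  have hmem : ∀ p ∈ PySem.List.sorted po (fun x => (x.2.length : Int)) false,
      ∀ o ∈ p.2, o ∈ (PySem.List.sorted (pvChurnB po).items (fun x => x.2) false).map Prod.fst := by
    intro p hp o ho
    have hppo : p ∈ po := (PySem.List.mem_sorted _ _ _ _).mp hp
    have hok : o ∈ (pvChurnB po).keys := by
      have := (pv_mem_keys_churn_fold po PySem.Dict.empty o).mpr
        (Or.inr ⟨p, hppo, ho⟩)
      exact this
    rw [List.Perm.mem_iff hpermf, hkeys]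
    exact hok
  have hfold := PySem.List.foldl_congr_mem
    (PySem.List.sorted po (fun x => (x.2.length : Int)) false)
    (pvStepA (PySem.List.sorted (pvChurnB po).items (fun x => x.2) false))
    (pvStepB (pvRank (PySem.List.sorted (pvChurnB po).items (fun x => x.2) false)))
    (PySem.Dict.empty, PySem.Set.empty)
    (fun acc p hp => pv_step_eq _ hnd acc p (hmem p hp))
  rw [hfold]
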